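-- pv_equiv track=rewrite | github.com/gratach/distrida | src/distrida/address_system/weg.py | teilWegZuUInt
-- ===== SOURCE A (Python) =====
-- def teilWegZuUInt(weg):
--     l = len(weg)
--     i = 0
--     mul = 1
--     ges = 0
--     while i < l:
--         ges += (weg[i] + 1) * mul
--         mul *= 254
--         i += 1
--     return ges
-- ===== SOURCE B (Python) =====
-- def teilWegZuUInt(weg):
--     ges = 0
--     for x in reversed(weg):
--         ges = ges * 254 + (x + 1)
--     return ges
-- ===== Notes on version B (the rewrite author's own statement) =====
-- stated objective: simpler
-- what changed: Replaces the index loop with a separate power accumulator `mul` by Horner's method over the reversed list, dropping `l`, `i` and `mul` entirely.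
import Mathlib
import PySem

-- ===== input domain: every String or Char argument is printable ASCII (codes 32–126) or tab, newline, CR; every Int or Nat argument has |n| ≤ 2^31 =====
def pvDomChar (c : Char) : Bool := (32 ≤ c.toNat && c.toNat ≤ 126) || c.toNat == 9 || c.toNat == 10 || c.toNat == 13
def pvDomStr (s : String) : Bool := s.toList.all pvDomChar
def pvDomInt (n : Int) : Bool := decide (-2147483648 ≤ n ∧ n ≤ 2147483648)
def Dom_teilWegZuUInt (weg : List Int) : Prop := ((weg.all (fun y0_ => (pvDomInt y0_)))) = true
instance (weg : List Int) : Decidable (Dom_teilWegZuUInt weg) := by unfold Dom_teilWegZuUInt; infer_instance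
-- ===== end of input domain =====

-- B replaces A's power-accumulator loop with Horner's method over the reversed list (simpler).

-- ===== PORT A =====
-- A's while loop over i, carrying (mul, ges); the list is consumed in order, so the
-- index loop becomes structural recursion over the remaining suffix.
def teilWegZuUIntGo : List Int → Int → Int → Int
  | [], _, ges => ges
  | x :: xs, mul, ges => teilWegZuUIntGo xs (mul * 254) (ges + (x + 1) * mul)

def teilWegZuUInt (weg : List Int) : Int := teilWegZuUIntGo weg 1 0

-- ===== PORT B =====
def teilWegZuUInt_alt (weg : List Int) : Int :=
  weg.reverse.foldl (fun ges x => ges * 254 + (x + 1)) 0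

-- ===== PRECONDITION & SPEC =====
def Spec_teilWegZuUInt (weg : List Int) (out : Int) : Prop := out = teilWegZuUInt_alt weg
instance (weg : List Int) (out : Int) : Decidable (Spec_teilWegZuUInt weg out) := by unfold Spec_teilWegZuUInt; infer_instance

-- ===== CLAIM (what is proved, stated in full; the proofs are below) =====
def Claim_equal_teilWegZuUInt : Prop := ∀ (weg : List Int), Dom_teilWegZuUInt weg → Spec_teilWegZuUInt weg (teilWegZuUInt weg)

-- ===== LEMMAS AND PROOFS =====

theorem teilWegZuUIntGo_eq_alt (weg : List Int) (mul ges : Int) :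
    teilWegZuUIntGo weg mul ges = ges + mul * teilWegZuUInt_alt weg := by
  induction weg generalizing mul ges with
  | nil => simp [teilWegZuUIntGo, teilWegZuUInt_alt]
  | cons x xs ih =>
    simp only [teilWegZuUIntGo, teilWegZuUInt_alt, List.reverse_cons, List.foldl_append,
      List.foldl_cons, List.foldl_nil] at *
    rw [ih]
    ring

-- ===== VERDICT (by name: the statement is the Claim_ definition above) =====
theorem teilWegZuUInt_spec : Claim_equal_teilWegZuUInt := by
  intro weg _
  show teilWegZuUInt weg = teilWegZuUInt_alt weg
  rw [teilWegZuUInt, teilWegZuUIntGo_eq_alt]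
  ring
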